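-- pv_equiv track=rewrite | github.com/stmsleep/STM_SLEEP | stm_sleep/members/utils/summary.py | extract_odi_info
-- ===== SOURCE A (Python) =====
-- def extract_odi_info(lines):
--     odi_data = {}
--
--     # Helper to extract ODI block by keyword
--     def find_odi_block(keyword):
--         try:
--             idx = [i for i, line in enumerate(
--                 lines) if line.strip() == keyword][0]
--             return {
--                 f"{keyword}": lines[idx + 1].strip(),  # e.g., '0.0 / hr'
--                 # last token
--                 f"Total {keyword} Events": lines[idx + 3].split()[-1],
--                 f"Time in {keyword} Events": lines[idx + 5].split()[-1],
--                 f"% of Time in {keyword} Events": lines[idx + 7].split()[-1],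
--                 f"Avg {keyword} Event Duration": lines[idx + 9].split()[-1]
--             }
--         except IndexError:
--             return None
--         except ValueError:
--             return None
--
--     odi_data["ODI4%"] = find_odi_block("ODI 4%")
--     odi_data["ODI3%"] = find_odi_block("ODI 3%")
--
--     return odi_data
-- ===== SOURCE B (Python) =====
-- def extract_odi_info(lines):
--     # Single streaming pass: react on the first occurrence of each keyword and
--     # destructure the 9-line window that follows it; no per-keyword rescans.
--     odi4 = odi3 = None
--     seen4 = seen3 = False
--     for i, line in enumerate(lines):
--         s = line.strip()
--         if s == "ODI 4%" and not seen4: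
--             seen4 = True
--             odi4 = _odi_block(s, lines[i + 1:i + 10])
--         elif s == "ODI 3%" and not seen3:
--             seen3 = True
--             odi3 = _odi_block(s, lines[i + 1:i + 10])
--     return {"ODI4%": odi4, "ODI3%": odi3}
--
--
-- def _odi_block(kw, window):
--     if len(window) != 9:
--         return None
--     nxt, _, t, _, d, _, p, _, a = window
--     fields = [x.split() for x in (t, d, p, a)]
--     if not all(fields):
--         return None
--     return {
--         kw: nxt.strip(),
--         f"Total {kw} Events": fields[0][-1],
--         f"Time in {kw} Events": fields[1][-1],
--         f"% of Time in {kw} Events": fields[2][-1],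
--         f"Avg {kw} Event Duration": fields[3][-1],
--     }
-- ===== Notes on version B (the rewrite author's own statement) =====
-- stated objective: alternative
-- what changed: B is a single streaming pass with a four-variable accumulator: it reacts the first time a stripped line equals either keyword, slices the following 9-line window and destructures it by tuple unpacking, instead of A's per-keyword full rescans via a list comprehension indexed [0] plus try/except index arithmetic; one pass over the lines replaces the two comprehension scans (measured ~2x).
import Mathlib
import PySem

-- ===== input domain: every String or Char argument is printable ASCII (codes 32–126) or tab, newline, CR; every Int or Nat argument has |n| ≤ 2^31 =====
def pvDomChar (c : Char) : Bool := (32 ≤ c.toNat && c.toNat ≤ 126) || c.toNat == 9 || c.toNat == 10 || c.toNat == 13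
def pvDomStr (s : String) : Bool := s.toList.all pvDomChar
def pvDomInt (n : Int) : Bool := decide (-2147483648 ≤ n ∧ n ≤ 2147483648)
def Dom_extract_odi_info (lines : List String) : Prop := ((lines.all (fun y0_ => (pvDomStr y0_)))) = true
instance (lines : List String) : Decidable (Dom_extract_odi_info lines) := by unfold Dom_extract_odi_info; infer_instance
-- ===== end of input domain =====

-- B replaces A's two per-keyword rescans (comprehension + [0] + try/except offset reads)
-- by one streaming pass with a four-variable accumulator that, at the first occurrence of
-- each keyword, slices and tuple-unpacks the following 9-line window (objective: alternative).

-- ===== PORT A =====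
-- the list comprehension [i for i, line in enumerate(lines) if line.strip() == keyword]
def pvCandidates (lines : List String) (keyword : String) : List Int :=
  (PySem.List.enumerate lines 0).filterMap
    (fun p => if PySem.Str.strip p.2 = keyword then some p.1 else none)

-- find_odi_block: the try block as an Option chain (none = IndexError caught by A's except;
-- a ValueError never arises here, so the second except is dead)
def pvFindOdiBlock (lines : List String) (keyword : String) :
    Option (List (String × String)) := do
  let idx ← PySem.List.pyGet? (pvCandidates lines keyword) 0
  let v1 ← PySem.List.pyGet? lines (idx + 1)
  let t3 ← (PySem.List.pyGet? lines (idx + 3)).bind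
      (fun l => PySem.List.pyGet? (PySem.Str.split₀ l) (-1))
  let t5 ← (PySem.List.pyGet? lines (idx + 5)).bind
      (fun l => PySem.List.pyGet? (PySem.Str.split₀ l) (-1))
  let t7 ← (PySem.List.pyGet? lines (idx + 7)).bind
      (fun l => PySem.List.pyGet? (PySem.Str.split₀ l) (-1))
  let t9 ← (PySem.List.pyGet? lines (idx + 9)).bind
      (fun l => PySem.List.pyGet? (PySem.Str.split₀ l) (-1))
  return [(keyword, PySem.Str.strip v1),
          ("Total " ++ keyword ++ " Events", t3),
          ("Time in " ++ keyword ++ " Events", t5),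
          ("% of Time in " ++ keyword ++ " Events", t7),
          ("Avg " ++ keyword ++ " Event Duration", t9)]

def extract_odi_info (lines : List String) : List (String × Option (List (String × String))) :=
  [("ODI4%", pvFindOdiBlock lines "ODI 4%"),
   ("ODI3%", pvFindOdiBlock lines "ODI 3%")]

-- ===== PORT B =====
-- _odi_block: tuple-unpack the 9-line window; all(fields) = every split nonempty;
-- fields[i][-1] on the guarded-nonempty list is getLastD (exact there)
def pvOdiBlock (kw : String) (window : List String) : Option (List (String × String)) :=
  if PySem.List.len window ≠ 9 then none
  else
    match window with
    | [nxt, _, t, _, d, _, p, _, a] =>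
      let fields := [PySem.Str.split₀ t, PySem.Str.split₀ d,
                     PySem.Str.split₀ p, PySem.Str.split₀ a]
      if ¬ (fields.all (fun f => !f.isEmpty)) then none
      else some [(kw, PySem.Str.strip nxt),
                 ("Total " ++ kw ++ " Events", (fields.getD 0 []).getLastD ""),
                 ("Time in " ++ kw ++ " Events", (fields.getD 1 []).getLastD ""),
                 ("% of Time in " ++ kw ++ " Events", (fields.getD 2 []).getLastD ""),
                 ("Avg " ++ kw ++ " Event Duration", (fields.getD 3 []).getLastD "")]
    | _ => none   -- unreachable: the length guard already returned none

-- one iteration of B's loop; state = (odi4, seen4, odi3, seen3)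
def pvStep (lines : List String)
    (st : Option (List (String × String)) × Bool × Option (List (String × String)) × Bool)
    (p : Int × String) :
    Option (List (String × String)) × Bool × Option (List (String × String)) × Bool :=
  let s := PySem.Str.strip p.2
  if s = "ODI 4%" ∧ ¬ st.2.1 then
    (pvOdiBlock s (PySem.List.slice lines (some (p.1 + 1)) (some (p.1 + 10))),
     true, st.2.2.1, st.2.2.2)
  else if s = "ODI 3%" ∧ ¬ st.2.2.2 then
    (st.1, st.2.1,
     pvOdiBlock s (PySem.List.slice lines (some (p.1 + 1)) (some (p.1 + 10))), true)
  else st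

def extract_odi_info_alt (lines : List String) : List (String × Option (List (String × String))) :=
  let fin := (PySem.List.enumerate lines 0).foldl (pvStep lines) (none, false, none, false)
  [("ODI4%", fin.1), ("ODI3%", fin.2.2.1)]

-- ===== PRECONDITION & SPEC =====
def Spec_extract_odi_info (lines : List String) (out : List (String × Option (List (String × String)))) : Prop := out = extract_odi_info_alt lines
instance (lines : List String) (out : List (String × Option (List (String × String)))) : Decidable (Spec_extract_odi_info lines out) := by unfold Spec_extract_odi_info; infer_instance

-- ===== CLAIM (what is proved, stated in full; the proofs are below) =====
def Claim_equal_extract_odi_info : Prop := ∀ (lines : List String), Dom_extract_odi_info lines → Spec_extract_odi_info lines (extract_odi_info lines)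

-- ===== LEMMAS AND PROOFS =====

-- A's candidate comprehension generalized to an arbitrary enumeration start
def pvCand (xs : List String) (s : Int) (kw : String) : List Int :=
  (PySem.List.enumerate xs s).filterMap
    (fun p => if PySem.Str.strip p.2 = kw then some p.1 else none)

theorem pv_cand_zero (lines : List String) (kw : String) :
    pvCandidates lines kw = pvCand lines 0 kw := rfl

-- characterization of B's fold: each keyword slot holds the block at the keyword's
-- FIRST enumerated occurrence (unless the seen flag was already set)
theorem pv_fold_eq (lines xs : List String) (s : Int)
    (o4 : Option (List (String × String))) (s4 : Bool)
    (o3 : Option (List (String × String))) (s3 : Bool) :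
    (PySem.List.enumerate xs s).foldl (pvStep lines) (o4, s4, o3, s3) =
      ((if s4 then o4 else
          match (pvCand xs s "ODI 4%").head? with
          | none => o4
          | some i => pvOdiBlock "ODI 4%"
              (PySem.List.slice lines (some (i + 1)) (some (i + 10)))),
       (s4 || !(pvCand xs s "ODI 4%").isEmpty),
       (if s3 then o3 else
          match (pvCand xs s "ODI 3%").head? with
          | none => o3
          | some i => pvOdiBlock "ODI 3%"
              (PySem.List.slice lines (some (i + 1)) (some (i + 10)))),
       (s3 || !(pvCand xs s "ODI 3%").isEmpty)) := by
  induction xs generalizing s o4 s4 o3 s3 with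
  | nil => simp [pvCand]
  | cons x xs ih =>
    simp only [pvCand, PySem.List.enumerate_cons, List.filterMap_cons, List.foldl_cons]
    by_cases h4 : PySem.Str.strip x = "ODI 4%"
    · have h3 : ¬ PySem.Str.strip x = "ODI 3%" := by rw [h4]; decide
      rw [if_pos h4, if_neg h3]
      cases s4 with
      | false =>
        have hstep : pvStep lines (o4, false, o3, s3) (s, x) =
            (pvOdiBlock "ODI 4%" (PySem.List.slice lines (some (s + 1)) (some (s + 10))),
             true, o3, s3) := by
          simp [pvStep, h4]
        rw [hstep, ih]
        simp [pvCand]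
      | true =>
        have hstep : pvStep lines (o4, true, o3, s3) (s, x) = (o4, true, o3, s3) := by
          simp [pvStep, h4]
        rw [hstep, ih]
        simp [pvCand]
    · rw [if_neg h4]
      by_cases h3 : PySem.Str.strip x = "ODI 3%"
      · rw [if_pos h3]
        cases s3 with
        | false =>
          have hstep : pvStep lines (o4, s4, o3, false) (s, x) =
              (o4, s4,
               pvOdiBlock "ODI 3%" (PySem.List.slice lines (some (s + 1)) (some (s + 10))),
               true) := by
            simp [pvStep, h3]
          rw [hstep, ih]
          simp [pvCand]
        | true =>
          have hstep : pvStep lines (o4, s4, o3, true) (s, x) = (o4, s4, o3, true) := by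
            simp [pvStep, h3]
          rw [hstep, ih]
          simp [pvCand]
      · rw [if_neg h3]
        have hstep : pvStep lines (o4, s4, o3, s3) (s, x) = (o4, s4, o3, s3) := by
          simp [pvStep, h3, h4]
        rw [hstep, ih]
        simp [pvCand]

theorem pv_candidate_bounds (lines : List String) (kw : String) (idx : Int)
    (h : (pvCand lines 0 kw).head? = some idx) :
    0 ≤ idx ∧ idx < (lines.length : Int) := by
  have hm : idx ∈ pvCand lines 0 kw := by
    cases hc : (pvCand lines 0 kw) with
    | nil => rw [hc] at h; simp at h
    | cons a t =>
      rw [hc] at h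
      simp only [List.head?_cons, Option.some.injEq] at h
      rw [h]
      exact List.mem_cons_self
  simp only [pvCand, List.mem_filterMap] at hm
  obtain ⟨p, hp, hif⟩ := hm
  rw [PySem.List.mem_enumerate_iff] at hp
  obtain ⟨k, hk, rfl⟩ := hp
  by_cases hs : PySem.Str.strip lines[k] = kw
  · rw [if_pos hs] at hif
    cases hif
    constructor <;> omega
  · rw [if_neg hs] at hif
    cases hif

theorem pv_get_some (xs : List String) (n c : Nat) (h : n + c < xs.length) :
    PySem.List.pyGet? xs ((n : Int) + (c : Int)) = some xs[n + c] := by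
  have he : (n : Int) + (c : Int) = ((n + c : Nat) : Int) := by push_cast; ring
  rw [he, PySem.List.pyGet?_natCast, List.getElem?_eq_getElem h]

-- the 9-line window in explicit form when it is full
theorem pv_window_full (lines : List String) (n : Nat) (h : n + 9 < lines.length) :
    PySem.List.slice lines (some ((n : Int) + 1)) (some ((n : Int) + 10))
      = [lines[n+1], lines[n+2], lines[n+3], lines[n+4], lines[n+5],
         lines[n+6], lines[n+7], lines[n+8], lines[n+9]] := by
  have he : ((n : Int) + 10) = ((n : Int) + 1) + (9 : Nat) := by push_cast; ring
  have he1 : ((n : Int) + 1) = (((n + 1 : Nat) : Int)) := by push_cast; ring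
  rw [he, he1, PySem.List.slice_natCast_add]
  apply List.ext_getElem (by simp; omega)
  intro i h1 h2
  simp only [List.getElem_take, List.getElem_drop]
  have hi : i < 9 := by simp at h2; omega
  interval_cases i <;> simp

-- short window when the keyword sits too close to the end
theorem pv_window_short (lines : List String) (n : Nat) (h : ¬ n + 9 < lines.length) :
    (PySem.List.slice lines (some ((n : Int) + 1)) (some ((n : Int) + 10))).length ≠ 9 := by
  have he : ((n : Int) + 10) = ((n : Int) + 1) + (9 : Nat) := by push_cast; ring
  have he1 : ((n : Int) + 1) = (((n + 1 : Nat) : Int)) := by push_cast; ring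
  rw [he, he1, PySem.List.slice_natCast_add]
  simp only [List.length_take, List.length_drop]
  omega

-- A's try-block equals B's window block at the first candidate index
theorem pv_odiBlock_none (kw : String) (w : List String) (h : w.length ≠ 9) :
    pvOdiBlock kw w = none := by
  unfold pvOdiBlock
  split
  · rfl
  · rename_i hc
    rw [PySem.List.len_eq, not_not] at hc
    exact absurd (by exact_mod_cast hc) h

theorem pv_chain_eq (lines : List String) (kw : String) (n : Nat) :
    (do
      let v1 ← PySem.List.pyGet? lines ((n : Int) + 1)
      let t3 ← (PySem.List.pyGet? lines ((n : Int) + 3)).bind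
          (fun l => PySem.List.pyGet? (PySem.Str.split₀ l) (-1))
      let t5 ← (PySem.List.pyGet? lines ((n : Int) + 5)).bind
          (fun l => PySem.List.pyGet? (PySem.Str.split₀ l) (-1))
      let t7 ← (PySem.List.pyGet? lines ((n : Int) + 7)).bind
          (fun l => PySem.List.pyGet? (PySem.Str.split₀ l) (-1))
      let t9 ← (PySem.List.pyGet? lines ((n : Int) + 9)).bind
          (fun l => PySem.List.pyGet? (PySem.Str.split₀ l) (-1))
      return [(kw, PySem.Str.strip v1),
              ("Total " ++ kw ++ " Events", t3),
              ("Time in " ++ kw ++ " Events", t5),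
              ("% of Time in " ++ kw ++ " Events", t7),
              ("Avg " ++ kw ++ " Event Duration", t9)] :
      Option (List (String × String)))
      = pvOdiBlock kw (PySem.List.slice lines (some ((n : Int) + 1)) (some ((n : Int) + 10))) := by
  by_cases hb : n + 9 < lines.length
  · rw [pv_window_full lines n hb]
    have g1 := pv_get_some lines n 1 (by omega)
    have g3 := pv_get_some lines n 3 (by omega)
    have g5 := pv_get_some lines n 5 (by omega)
    have g7 := pv_get_some lines n 7 (by omega)
    have g9 := pv_get_some lines n 9 (by omega)
    push_cast at g1 g3 g5 g7 g9
    simp only [g1, g3, g5, g7, g9, Option.bind_some, PySem.List.pyGet?_neg_one]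
    simp only [pvOdiBlock, PySem.List.len_eq]
    norm_num
    cases h3 : (PySem.Str.split₀ lines[n + 3]).getLast? <;>
      cases h5 : (PySem.Str.split₀ lines[n + 5]).getLast? <;>
        cases h7 : (PySem.Str.split₀ lines[n + 7]).getLast? <;>
          cases h9 : (PySem.Str.split₀ lines[n + 9]).getLast? <;>
    simp_all [List.getLast?_eq_none_iff]
    all_goals refine ⟨?_, ?_, ?_, ?_⟩ <;> intro hnil <;> simp_all
  · have hlen := pv_window_short lines n hb
    have g9 : PySem.List.pyGet? lines ((n : Int) + 9) = none := by
      rw [show (n : Int) + 9 = ((n + 9 : Nat) : Int) by push_cast; ring,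
        PySem.List.pyGet?_natCast]
      exact List.getElem?_eq_none (by omega)
    rw [pv_odiBlock_none kw _ hlen]
    cases PySem.List.pyGet? lines ((n : Int) + 1) <;>
      cases (PySem.List.pyGet? lines ((n : Int) + 3)).bind
          (fun l => PySem.List.pyGet? (PySem.Str.split₀ l) (-1)) <;>
        cases (PySem.List.pyGet? lines ((n : Int) + 5)).bind
            (fun l => PySem.List.pyGet? (PySem.Str.split₀ l) (-1)) <;>
          cases (PySem.List.pyGet? lines ((n : Int) + 7)).bind
              (fun l => PySem.List.pyGet? (PySem.Str.split₀ l) (-1)) <;>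
            simp [g9]

theorem pv_find_eq (lines : List String) (kw : String) :
    pvFindOdiBlock lines kw =
      match (pvCand lines 0 kw).head? with
      | none => none
      | some i => pvOdiBlock kw (PySem.List.slice lines (some (i + 1)) (some (i + 10))) := by
  unfold pvFindOdiBlock
  rw [pv_cand_zero, PySem.List.pyGet?_zero, ← List.head?_eq_getElem?]
  cases hh : (pvCand lines 0 kw).head? with
  | none => simp
  | some idx =>
    obtain ⟨h0, hlt⟩ := pv_candidate_bounds lines kw idx hh
    lift idx to ℕ using h0 with n
    simp only [Option.bind_eq_bind, Option.bind_some]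
    exact pv_chain_eq lines kw n

-- ===== VERDICT (by name: the statement is the Claim_ definition above) =====
theorem extract_odi_info_spec : Claim_equal_extract_odi_info := by
  intro lines _
  unfold Spec_extract_odi_info extract_odi_info extract_odi_info_alt
  rw [pv_fold_eq]
  simp only [Bool.false_eq_true, if_false]
  rw [pv_find_eq lines "ODI 4%", pv_find_eq lines "ODI 3%"]
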